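-- pv_equiv track=rewrite | github.com/tcteh86/GoGoHannah | backend/app/core/phonics.py | _split_token
-- ===== SOURCE A (Python) =====
-- _PHONICS_PATTERNS = [
--     "eigh",
--     "igh",
--     "tion",
--     "sion",
--     "tch",
--     "ch",
--     "sh",
--     "th",
--     "ph",
--     "wh",
--     "ck",
--     "ng",
--     "qu",
--     "ee",
--     "oo",
--     "ai",
--     "ay",
--     "ea",
--     "ie",
--     "oa",
--     "ou",
--     "ow",
--     "ar",
--     "er",
--     "ir",
--     "or",
--     "ur",
--     "oi",
--     "oy",
--     "au",
--     "aw",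
-- ]
--
-- def _split_token(token: str) -> list[str]:
--     parts: list[str] = []
--     i = 0
--     while i < len(token):
--         matched = None
--         for pattern in _PHONICS_PATTERNS:
--             if token.startswith(pattern, i):
--                 matched = pattern
--                 break
--         if matched:
--             parts.append(matched)
--             i += len(matched)
--         else:
--             parts.append(token[i])
--             i += 1
--     return parts
-- ===== SOURCE B (Python) =====
-- # Hash-indexed rewrite: every phonics pattern has a unique two-character prefix,
-- # so one dict lookup of the digraph at the cursor (value = the pattern's tail)
-- # replaces A's linear startswith-scan over the 31-pattern list.
-- _TAIL_BY_DIGRAPH = {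
--     "ei": "gh", "ig": "h", "ti": "on", "si": "on", "tc": "h",
--     "ch": "", "sh": "", "th": "", "ph": "", "wh": "",
--     "ck": "", "ng": "", "qu": "", "ee": "", "oo": "",
--     "ai": "", "ay": "", "ea": "", "ie": "", "oa": "",
--     "ou": "", "ow": "", "ar": "", "er": "", "ir": "",
--     "or": "", "ur": "", "oi": "", "oy": "", "au": "", "aw": "",
-- }
--
--
-- def _split_token(token: str) -> list[str]:
--     parts: list[str] = []
--     i = 0
--     n = len(token)
--     while i < n:
--         digraph = token[i:i + 2]
--         tail = _TAIL_BY_DIGRAPH.get(digraph)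
--         if tail is not None and token.startswith(tail, i + 2):
--             parts.append(digraph + tail)
--             i += 2 + len(tail)
--         else:
--             parts.append(token[i])
--             i += 1
--     return parts
-- ===== Notes on version B (the rewrite author's own statement) =====
-- stated objective: faster
-- what changed: Every phonics pattern has a unique two-character prefix, so A's inner first-match startswith-scan over the ordered 31-pattern list is replaced by a single hash lookup of the digraph at the cursor in a dict mapping digraph -> pattern tail, plus one tail check.
import Mathlib
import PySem

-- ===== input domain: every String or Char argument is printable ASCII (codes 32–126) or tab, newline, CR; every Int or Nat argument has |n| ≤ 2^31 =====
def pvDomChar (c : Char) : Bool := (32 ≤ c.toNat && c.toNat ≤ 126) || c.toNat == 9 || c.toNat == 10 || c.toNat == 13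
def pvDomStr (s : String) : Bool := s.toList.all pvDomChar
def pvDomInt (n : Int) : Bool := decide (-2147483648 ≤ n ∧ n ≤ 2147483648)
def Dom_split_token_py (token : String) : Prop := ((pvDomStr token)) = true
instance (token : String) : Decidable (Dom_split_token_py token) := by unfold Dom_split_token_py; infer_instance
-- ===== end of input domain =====

-- B: every pattern has a unique two-char prefix, so one dict lookup of the
-- digraph at the cursor (value = pattern tail) + one tail check replaces A's
-- first-match startswith-scan over the ordered 31-pattern list.

-- ===== PORT A =====
-- the module constant _PHONICS_PATTERNS, as code-point lists
def phonicsPatternsL : List (List Char) :=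
  [['e', 'i', 'g', 'h'], ['i', 'g', 'h'], ['t', 'i', 'o', 'n'], ['s', 'i', 'o', 'n'], ['t', 'c', 'h'],
   ['c', 'h'], ['s', 'h'], ['t', 'h'], ['p', 'h'], ['w', 'h'],
   ['c', 'k'], ['n', 'g'], ['q', 'u'], ['e', 'e'], ['o', 'o'],
   ['a', 'i'], ['a', 'y'], ['e', 'a'], ['i', 'e'], ['o', 'a'],
   ['o', 'u'], ['o', 'w'], ['a', 'r'], ['e', 'r'], ['i', 'r'],
   ['o', 'r'], ['u', 'r'], ['o', 'i'], ['o', 'y'], ['a', 'u'],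
   ['a', 'w']]

-- A's while loop over the cursor i, as fuel-guarded recursion over the suffix
-- token[i:] (the cursor only moves forward, so the suffix is the loop state);
-- the inner for/break over _PHONICS_PATTERNS is List.find?, and
-- token.startswith(pattern, i) is "pattern is a prefix of the suffix".
def splitGoA : Nat → List Char → List (List Char)
  | 0, _ => []
  | _ + 1, [] => []
  | fuel + 1, c :: rest =>
    match phonicsPatternsL.find? (fun p => p.isPrefixOf (c :: rest)) with
    | some p => p :: splitGoA fuel ((c :: rest).drop p.length)
    | none => [c] :: splitGoA fuel rest

def split_token_py (token : String) : List String :=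
  (splitGoA token.toList.length token.toList).map String.ofList

-- ===== PORT B =====
-- Source B's literal dict _TAIL_BY_DIGRAPH (digraph -> pattern tail)
def tailByDigraph : PySem.Dict String String :=
  PySem.Dict.ofList
    [("ei", "gh"), ("ig", "h"), ("ti", "on"), ("si", "on"), ("tc", "h"),
     ("ch", ""), ("sh", ""), ("th", ""), ("ph", ""), ("wh", ""),
     ("ck", ""), ("ng", ""), ("qu", ""), ("ee", ""), ("oo", ""),
     ("ai", ""), ("ay", ""), ("ea", ""), ("ie", ""), ("oa", ""),
     ("ou", ""), ("ow", ""), ("ar", ""), ("er", ""), ("ir", ""),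
     ("or", ""), ("ur", ""), ("oi", ""), ("oy", ""), ("au", ""), ("aw", "")]

-- Source B's while loop on the suffix token[i:]: token[i:i+2] is `take 2`,
-- _TAIL_BY_DIGRAPH.get is Dict.get?, token.startswith(tail, i+2) is
-- "tail is a prefix of the suffix dropped by 2".
def splitGoB : Nat → List Char → List (List Char)
  | 0, _ => []
  | _ + 1, [] => []
  | fuel + 1, c :: rest =>
    let digraph := (c :: rest).take 2
    match tailByDigraph.get? (String.ofList digraph) with
    | some tail =>
      if tail.toList.isPrefixOf ((c :: rest).drop 2) then
        (digraph ++ tail.toList) :: splitGoB fuel ((c :: rest).drop (2 + tail.toList.length))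
      else
        [c] :: splitGoB fuel rest
    | none => [c] :: splitGoB fuel rest

def split_token_py_alt (token : String) : List String :=
  (splitGoB token.toList.length token.toList).map String.ofList

-- ===== PRECONDITION & SPEC =====
def Spec_split_token_py (token : String) (out : List String) : Prop := out = split_token_py_alt token
instance (token : String) (out : List String) : Decidable (Spec_split_token_py token out) := by unfold Spec_split_token_py; infer_instance

-- ===== CLAIM (what is proved, stated in full; the proofs are below) =====
def Claim_equal_split_token_py : Prop := ∀ (token : String), Dom_split_token_py token → Spec_split_token_py token (split_token_py token)

-- ===== LEMMAS AND PROOFS =====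

-- every pattern has length ≥ 2
theorem patterns_len (p : List Char) (hp : p ∈ phonicsPatternsL) : 2 ≤ p.length := by
  fin_cases hp <;> decide

-- the table, read off a pattern: key = its first two chars, value = its tail
theorem table_get_pattern (p : List Char) (hp : p ∈ phonicsPatternsL) :
    tailByDigraph.get? (String.ofList (p.take 2)) = some (String.ofList (p.drop 2)) := by
  fin_cases hp <;> decide

-- conversely, every table entry glues back to a pattern, and every key is a digraph
theorem table_items_sound (kv : String × String) (h : kv ∈ tailByDigraph.items) :
    kv.1.toList ++ kv.2.toList ∈ phonicsPatternsL ∧ kv.1.toList.length = 2 := by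
  fin_cases h <;> exact ⟨by decide, by decide⟩

-- one loop step: A's matched pattern = B's emitted piece, and the drops agree
theorem splitGo_eq (fuel : Nat) : ∀ cs, splitGoA fuel cs = splitGoB fuel cs := by
  induction fuel with
  | zero => intro cs; rfl
  | succ f ih =>
    intro cs
    cases cs with
    | nil => rfl
    | cons c rest =>
      cases hm : phonicsPatternsL.find? (fun p => p.isPrefixOf (c :: rest)) with
      | some p =>
        have hmem := List.mem_of_find?_eq_some hm
        have hpre : p <+: (c :: rest) := by
          have := List.find?_some hm
          simpa [List.isPrefixOf_iff_prefix] using this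
        have hlen := patterns_len p hmem
        have htake : p = (c :: rest).take p.length := (List.prefix_iff_eq_take.mp hpre)
        -- the digraph at the cursor is p's first two chars
        have hdig : (c :: rest).take 2 = p.take 2 := by
          rw [htake, List.take_take]
          congr 1
          omega
        have hget := table_get_pattern p hmem
        -- p's tail is a prefix of the suffix dropped by 2
        have htail : p.drop 2 <+: (c :: rest).drop 2 := by
          rw [htake, List.drop_take]
          exact List.take_prefix _ _
        simp only [splitGoA, splitGoB, hm, hdig, hget, String.toList_ofList,
          List.isPrefixOf_iff_prefix, if_pos htail]
        have hl : 2 + (List.drop 2 p).length = p.length := by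
          rw [List.length_drop]; omega
        rw [List.take_append_drop, hl, ih]
      | none =>
        have hnone := List.find?_eq_none.mp hm
        have hno : ∀ p ∈ phonicsPatternsL, ¬ p <+: (c :: rest) := by
          intro p hp hpre
          exact absurd (by simpa [List.isPrefixOf_iff_prefix] using hpre) (by simpa using hnone p hp)
        simp only [splitGoA, splitGoB, hm]
        cases hget : tailByDigraph.get? (String.ofList ((c :: rest).take 2)) with
        | none => simp [ih]
        | some tail =>
          have hitem := PySem.Dict.mem_items_of_get?_eq_some _ hget
          have hsound := table_items_sound _ hitem
          have hkey : (String.ofList ((c :: rest).take 2)).toList = (c :: rest).take 2 := by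
            simp [String.toList_ofList]
          -- the tail cannot match: otherwise the glued pattern would be a prefix of cs
          have hbad : ¬ tail.toList <+: (c :: rest).drop 2 := by
            intro hpre
            obtain ⟨t, ht⟩ := hpre
            apply hno _ hsound.1
            refine ⟨t, ?_⟩
            rw [hkey, List.append_assoc, ht, List.take_append_drop]
          have hbad' : tail.toList.isPrefixOf ((c :: rest).drop 2) = false := by
            rw [Bool.eq_false_iff]
            intro h
            exact hbad (List.isPrefixOf_iff_prefix.mp h)
          simp only [hbad', Bool.false_eq_true, if_false, ih]

-- ===== VERDICT (by name: the statement is the Claim_ definition above) =====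
theorem split_token_py_spec : Claim_equal_split_token_py := by
  intro token _
  unfold Spec_split_token_py split_token_py split_token_py_alt
  rw [splitGo_eq]
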